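-- pv_equiv track=rewrite | github.com/ksayee/programming_assignments | python/CodingExercises/LeetCode1385.py | LeetCode1385
-- ===== SOURCE A (Python) =====
-- def LeetCode1385(arr1,arr2,d):
--
--     cnt=0
--     for num1 in arr1:
--         flg=True
--         for num2 in arr2:
--             if abs(num1-num2)>d:
--                 pass
--             else:
--                 flg=False
--                 break
--         if flg==True:
--             cnt=cnt+1
--     return cnt
-- ===== SOURCE B (Python) =====
-- def LeetCode1385(arr1, arr2, d):
--     s = sorted(arr2)
--
--     def has_close(x):
--         # first index lo with s[lo] >= x - d (hand-written bisect_left)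
--         lo, hi = 0, len(s)
--         while lo < hi:
--             mid = (lo + hi) // 2
--             if s[mid] < x - d:
--                 lo = mid + 1
--             else:
--                 hi = mid
--         return lo < len(s) and s[lo] <= x + d
--
--     return sum(1 for x in arr1 if not has_close(x))
-- ===== Notes on version B (the rewrite author's own statement) =====
-- stated objective: faster
-- what changed: Replaces the inner linear scan of arr2 per arr1 element by sorting arr2 once and binary-searching the first element >= x-d, checking it against x+d.
import Mathlib
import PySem

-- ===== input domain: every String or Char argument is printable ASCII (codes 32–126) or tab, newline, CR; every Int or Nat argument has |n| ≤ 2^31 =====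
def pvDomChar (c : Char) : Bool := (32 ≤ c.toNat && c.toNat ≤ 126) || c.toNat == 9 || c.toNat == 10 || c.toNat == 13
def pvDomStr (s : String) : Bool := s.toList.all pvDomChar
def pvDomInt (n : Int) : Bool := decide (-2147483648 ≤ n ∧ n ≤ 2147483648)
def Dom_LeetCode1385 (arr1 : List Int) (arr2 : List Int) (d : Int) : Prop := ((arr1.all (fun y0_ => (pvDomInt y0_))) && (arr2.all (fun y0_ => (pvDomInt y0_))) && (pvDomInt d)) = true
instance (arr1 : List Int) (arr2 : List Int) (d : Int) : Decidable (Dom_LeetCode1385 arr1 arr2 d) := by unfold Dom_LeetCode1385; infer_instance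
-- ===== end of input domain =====

-- B sorts arr2 once and binary-searches per arr1 element instead of A's inner linear scan (objective: faster).

-- ===== PORT A =====
-- inner 'for num2 in arr2' loop with flg/break: returns the final flg
def lc1385InnerA (d : Int) (num1 : Int) : List Int → Bool
  | [] => true
  | num2 :: rest => if |num1 - num2| > d then lc1385InnerA d num1 rest else false

def LeetCode1385 (arr1 : List Int) (arr2 : List Int) (d : Int) : Int :=
  arr1.foldl (fun cnt num1 => if lc1385InnerA d num1 arr2 = true then cnt + 1 else cnt) 0

-- ===== PORT B =====
-- hand-written bisect_left loop of Source B: first index lo in [lo,hi) with s[lo] >= t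
-- (s[mid] is always in range when called with hi ≤ s.length, so getD is exact)
def lc1385Bsearch (s : List Int) (t : Int) (lo hi : Nat) : Nat :=
  if _h : lo < hi then
    let mid := (lo + hi) / 2
    if s.getD mid 0 < t then lc1385Bsearch s t (mid + 1) hi else lc1385Bsearch s t lo mid
  else lo
termination_by hi - lo

def lc1385HasClose (s : List Int) (d : Int) (x : Int) : Bool :=
  let lo := lc1385Bsearch s (x - d) 0 s.length
  decide (lo < s.length) && decide (s.getD lo 0 ≤ x + d)

def LeetCode1385_alt (arr1 : List Int) (arr2 : List Int) (d : Int) : Int :=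
  let s := PySem.List.sorted arr2 (fun y => y) false
  Int.ofNat (arr1.countP (fun x => !lc1385HasClose s d x))

-- ===== PRECONDITION & SPEC =====
def Spec_LeetCode1385 (arr1 : List Int) (arr2 : List Int) (d : Int) (out : Int) : Prop := out = LeetCode1385_alt arr1 arr2 d
instance (arr1 : List Int) (arr2 : List Int) (d : Int) (out : Int) : Decidable (Spec_LeetCode1385 arr1 arr2 d out) := by unfold Spec_LeetCode1385; infer_instance

-- ===== CLAIM (what is proved, stated in full; the proofs are below) =====
def Claim_equal_LeetCode1385 : Prop := ∀ (arr1 : List Int) (arr2 : List Int) (d : Int), Dom_LeetCode1385 arr1 arr2 d → Spec_LeetCode1385 arr1 arr2 d (LeetCode1385 arr1 arr2 d)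

-- ===== LEMMAS AND PROOFS =====

-- A's inner loop decides "no arr2 element within d"
theorem lc1385InnerA_eq_true_iff (d x : Int) (l : List Int) :
    lc1385InnerA d x l = true ↔ ∀ y ∈ l, ¬ |x - y| ≤ d := by
  induction l with
  | nil => simp [lc1385InnerA]
  | cons a t ih =>
    simp only [lc1385InnerA, List.mem_cons]
    split_ifs with h
    · constructor
      · intro ht y hy
        rcases hy with rfl | hy
        · omega
        · exact (ih.mp ht) y hy
      · intro hall; exact ih.mpr fun y hy => hall y (Or.inr hy)
    · constructor
      · intro hf; exact absurd hf (by simp)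
      · intro hall; exact absurd (hall a (Or.inl rfl)) (by omega)

-- sortedness gives monotone getD on valid indices
theorem sorted_getD_mono (s : List Int) (hs : s.Pairwise (· ≤ ·))
    {i j : Nat} (hij : i ≤ j) (hj : j < s.length) :
    s.getD i 0 ≤ s.getD j 0 := by
  rcases Nat.eq_or_lt_of_le hij with rfl | h
  · exact le_refl _
  · have hi : i < s.length := lt_trans h hj
    have := (List.pairwise_iff_getElem).mp hs i j hi hj h
    simpa [List.getD_eq_getElem?_getD, List.getElem?_eq_getElem, hi, hj] using this

-- correctness of the hand-written bisect_left loop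
theorem lc1385Bsearch_spec (s : List Int) (t : Int) (hs : s.Pairwise (· ≤ ·)) :
    ∀ n lo hi, hi - lo ≤ n → lo ≤ hi → hi ≤ s.length →
      (∀ i, i < lo → s.getD i 0 < t) →
      (hi < s.length → ¬ s.getD hi 0 < t) →
      lc1385Bsearch s t lo hi ≤ s.length ∧
      (∀ i, i < lc1385Bsearch s t lo hi → s.getD i 0 < t) ∧
      (lc1385Bsearch s t lo hi < s.length → ¬ s.getD (lc1385Bsearch s t lo hi) 0 < t) := by
  intro n
  induction n with
  | zero =>
    intro lo hi hfuel hle hlen hlow hhigh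
    have : lo = hi := by omega
    subst this
    rw [lc1385Bsearch]
    simp only [lt_irrefl, dif_neg, not_false_iff]
    exact ⟨hlen, hlow, hhigh⟩
  | succ n ih =>
    intro lo hi hfuel hle hlen hlow hhigh
    rw [lc1385Bsearch]
    by_cases h : lo < hi
    · simp only [h, dif_pos]
      set mid := (lo + hi) / 2 with hmid
      have hmlo : lo ≤ mid := by omega
      have hmhi : mid < hi := by omega
      by_cases hcmp : s.getD mid 0 < t
      · simp only [hcmp, if_pos]
        refine ih (mid + 1) hi (by omega) (by omega) hlen ?_ hhigh
        intro i hi'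
        by_cases hilo : i < lo
        · exact hlow i hilo
        · calc s.getD i 0 ≤ s.getD mid 0 :=
                sorted_getD_mono s hs (by omega) (by omega)
            _ < t := hcmp
      · simp only [hcmp, if_neg, not_false_iff]
        exact ih lo mid (by omega) (by omega) (by omega) hlow (fun _ => hcmp)
    · simp only [h, dif_neg, not_false_iff]
      have : lo = hi := by omega
      subst this
      exact ⟨hlen, hlow, hhigh⟩

-- the binary-search check decides "some element of s within d of x"
theorem lc1385HasClose_iff (s : List Int) (d x : Int) (hs : s.Pairwise (· ≤ ·)) :
    lc1385HasClose s d x = true ↔ ∃ y ∈ s, |x - y| ≤ d := by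
  unfold lc1385HasClose
  obtain ⟨hrlen, hbelow, hat⟩ :=
    lc1385Bsearch_spec s (x - d) hs s.length 0 s.length (by omega) (by omega) (le_refl _)
      (by omega) (by omega)
  generalize hR : lc1385Bsearch s (x - d) 0 s.length = r at *
  simp only [Bool.and_eq_true, decide_eq_true_eq]
  constructor
  · rintro ⟨hlt, hle⟩
    have hrD : s.getD r 0 = s[r]'hlt := by
      rw [List.getD_eq_getElem?_getD, List.getElem?_eq_getElem hlt]; rfl
    refine ⟨s.getD r 0, ?_, ?_⟩
    · rw [hrD]; exact List.getElem_mem hlt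
    · have h1 := hat hlt
      rw [abs_le]; omega
  · rintro ⟨y, hy, hyd⟩
    rw [abs_le] at hyd
    obtain ⟨j, hj, hjy⟩ := List.getElem_of_mem hy
    have hjD : s.getD j 0 = y := by
      rw [List.getD_eq_getElem?_getD, List.getElem?_eq_getElem hj]; simpa using hjy
    have hrj : r ≤ j := by
      by_contra hc
      have := hbelow j (by omega)
      omega
    have hrlt : r < s.length := lt_of_le_of_lt hrj hj
    refine ⟨hrlt, ?_⟩
    have := sorted_getD_mono s hs hrj hj
    omega

-- A's foldl counter equals countP
theorem lc1385_foldl_count (p : Int → Bool) (l : List Int) :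
    ∀ c : Int, l.foldl (fun cnt x => if p x = true then cnt + 1 else cnt) c
      = c + Int.ofNat (l.countP p) := by
  induction l with
  | nil => intro c; simp
  | cons a t ih =>
    intro c
    simp only [List.foldl_cons, List.countP_cons]
    by_cases h : p a = true
    · rw [if_pos h, ih]; simp [h]; omega
    · rw [if_neg h, ih]; simp [h]

-- ===== VERDICT (by name: the statement is the Claim_ definition above) =====
theorem LeetCode1385_spec : Claim_equal_LeetCode1385 := by
  intro arr1 arr2 d _
  unfold Spec_LeetCode1385 LeetCode1385 LeetCode1385_alt
  set s := PySem.List.sorted arr2 (fun y => y) false with hsdef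
  have hs : s.Pairwise (· ≤ ·) := by
    simpa using PySem.List.sorted_pairwise (xs := arr2) (key := fun y => y)
  have hperm : s.Perm arr2 := PySem.List.sorted_perm arr2 (fun y => y) false
  rw [lc1385_foldl_count]
  simp only [zero_add]
  congr 1
  apply List.countP_congr
  intro x _
  have : (lc1385InnerA d x arr2 = true) ↔ (!lc1385HasClose s d x) = true := by
    rw [lc1385InnerA_eq_true_iff, Bool.not_eq_true', Bool.eq_false_iff]
    rw [ne_eq, lc1385HasClose_iff s d x hs]
    constructor
    · rintro h ⟨y, hy, hyd⟩; exact h y (hperm.mem_iff.mp hy) hyd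
    · intro h y hy hyd; exact h ⟨y, hperm.mem_iff.mpr hy, hyd⟩
  simp only [this]
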